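-- pv_equiv track=rewrite | github.com/pablo-aledo/dotfiles | pkg/Ubuntu_22_04/mscz2vec/phrase_builder.py | snap_to_scale
-- ===== SOURCE A (Python) =====
-- SCALE_INTERVALS = {
--     "major":      [0, 2, 4, 5, 7, 9, 11],
--     "minor":      [0, 2, 3, 5, 7, 8, 10],   # natural
--     "harmonic":   [0, 2, 3, 5, 7, 8, 11],   # armónica
--     "melodic":    [0, 2, 3, 5, 7, 9, 11],   # melódica ascendente
--     "dorian":     [0, 2, 3, 5, 7, 9, 10],
--     "phrygian":   [0, 1, 3, 5, 7, 8, 10],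
--     "lydian":     [0, 2, 4, 6, 7, 9, 11],
--     "mixolydian": [0, 2, 4, 5, 7, 9, 10],
--     "locrian":    [0, 1, 3, 5, 6, 8, 10],
-- }
--
-- def snap_to_scale(pitch: int, root_pc: int, mode: str) -> int:
--     """Ajusta un pitch al grado de escala más cercano."""
--     intervals = SCALE_INTERVALS.get(mode, SCALE_INTERVALS["major"])
--     scale_pcs = set((root_pc + i) % 12 for i in intervals)
--     if pitch % 12 in scale_pcs:
--         return pitch
--     # Buscar el más cercano
--     for delta in range(1, 7):
--         if (pitch + delta) % 12 in scale_pcs: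
--             return pitch + delta
--         if (pitch - delta) % 12 in scale_pcs:
--             return pitch - delta
--     return pitch
-- ===== SOURCE B (Python) =====
-- SCALE_INTERVALS = {
--     "major":      [0, 2, 4, 5, 7, 9, 11],
--     "minor":      [0, 2, 3, 5, 7, 8, 10],   # natural
--     "harmonic":   [0, 2, 3, 5, 7, 8, 11],   # armónica
--     "melodic":    [0, 2, 3, 5, 7, 9, 11],   # melódica ascendente
--     "dorian":     [0, 2, 3, 5, 7, 9, 10],
--     "phrygian":   [0, 1, 3, 5, 7, 8, 10],
--     "lydian":     [0, 2, 4, 6, 7, 9, 11],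
--     "mixolydian": [0, 2, 4, 5, 7, 9, 10],
--     "locrian":    [0, 1, 3, 5, 6, 8, 10],
-- }
--
-- def snap_to_scale(pitch: int, root_pc: int, mode: str) -> int:
--     """Snap a pitch to the nearest scale degree: single argmin pass over the
--     scale degrees instead of the outward delta=1..6 ring search."""
--     intervals = SCALE_INTERVALS.get(mode, SCALE_INTERVALS["major"])
--     offsets = [(root_pc + i - pitch) % 12 for i in intervals]
--     offsets = [d if d <= 6 else d - 12 for d in offsets]
--     best = min(offsets, key=lambda o: 2 * abs(o) + (o < 0))
--     return pitch + best
-- ===== Notes on version B (the rewrite author's own statement) =====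
-- stated objective: alternative
-- what changed: Replaces A's outward delta=1..6 ring search over pitch classes by a single argmin pass over the seven scale degrees, picking the signed offset (root_pc + i - pitch) mod 12 mapped to [-5,6] that minimizes 2*|offset| + (offset<0), which reproduces A's prefer-upward tie-breaking.
import Mathlib
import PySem

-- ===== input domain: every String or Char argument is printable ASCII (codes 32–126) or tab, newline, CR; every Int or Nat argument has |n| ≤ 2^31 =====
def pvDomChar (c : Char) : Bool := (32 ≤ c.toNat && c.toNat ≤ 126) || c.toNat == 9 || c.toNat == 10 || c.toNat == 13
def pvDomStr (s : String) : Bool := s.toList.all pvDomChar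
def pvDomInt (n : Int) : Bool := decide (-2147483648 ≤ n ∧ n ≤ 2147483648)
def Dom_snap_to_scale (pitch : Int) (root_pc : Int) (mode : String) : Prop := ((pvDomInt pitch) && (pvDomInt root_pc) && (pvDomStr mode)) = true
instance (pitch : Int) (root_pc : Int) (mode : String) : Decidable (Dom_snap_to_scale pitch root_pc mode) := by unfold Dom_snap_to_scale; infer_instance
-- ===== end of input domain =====

-- B replaces A's outward delta=1..6 ring search by a single argmin pass over the
-- scale degrees (signed distance per degree, min by (2*|o| + [o<0])); alternative
-- decomposition, same exact result.

-- shared module-level constant (both Pythons carry the same SCALE_INTERVALS table)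
def SCALE_INTERVALS : PySem.Dict String (List Int) :=
  PySem.Dict.ofList
    [ ("major",      [0, 2, 4, 5, 7, 9, 11])
    , ("minor",      [0, 2, 3, 5, 7, 8, 10])
    , ("harmonic",   [0, 2, 3, 5, 7, 8, 11])
    , ("melodic",    [0, 2, 3, 5, 7, 9, 11])
    , ("dorian",     [0, 2, 3, 5, 7, 9, 10])
    , ("phrygian",   [0, 1, 3, 5, 7, 8, 10])
    , ("lydian",     [0, 2, 4, 6, 7, 9, 11])
    , ("mixolydian", [0, 2, 4, 5, 7, 9, 10])
    , ("locrian",    [0, 1, 3, 5, 6, 8, 10]) ]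

-- ===== PORT A =====
-- the 'for delta in range(1, 7)' loop with its two early returns
def snapLoopA (pitch : Int) (scale_pcs : PySem.Set Int) : List Int → Int
  | [] => pitch
  | delta :: rest =>
    if scale_pcs.contains (PySem.Int.mod (pitch + delta) 12) then pitch + delta
    else if scale_pcs.contains (PySem.Int.mod (pitch - delta) 12) then pitch - delta
    else snapLoopA pitch scale_pcs rest

def snap_to_scale (pitch : Int) (root_pc : Int) (mode : String) : Int :=
  let intervals := SCALE_INTERVALS.getD mode (SCALE_INTERVALS.getD "major" [])
  let scale_pcs : PySem.Set Int :=
    PySem.Set.ofList (intervals.map (fun i => PySem.Int.mod (root_pc + i) 12))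
  if scale_pcs.contains (PySem.Int.mod pitch 12) then pitch
  else snapLoopA pitch scale_pcs (PySem.List.pyRange 1 7 1)

-- ===== PORT B =====
def snap_to_scale_alt (pitch : Int) (root_pc : Int) (mode : String) : Int :=
  let intervals := SCALE_INTERVALS.getD mode (SCALE_INTERVALS.getD "major" [])
  let ds := intervals.map (fun i => PySem.Int.mod (root_pc + i - pitch) 12)
  let offsets := ds.map (fun d => if d ≤ 6 then d else d - 12)
  let best := (PySem.List.min? offsets (fun o => 2 * |o| + (if o < 0 then 1 else 0))).getD 0
  pitch + best

-- ===== PRECONDITION & SPEC =====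
def Spec_snap_to_scale (pitch : Int) (root_pc : Int) (mode : String) (out : Int) : Prop := out = snap_to_scale_alt pitch root_pc mode
instance (pitch : Int) (root_pc : Int) (mode : String) (out : Int) : Decidable (Spec_snap_to_scale pitch root_pc mode out) := by unfold Spec_snap_to_scale; infer_instance

-- ===== CLAIM (what is proved, stated in full; the proofs are below) =====
def Claim_equal_snap_to_scale : Prop := ∀ (pitch : Int) (root_pc : Int) (mode : String), Dom_snap_to_scale pitch root_pc mode → Spec_snap_to_scale pitch root_pc mode (snap_to_scale pitch root_pc mode)

-- ===== LEMMAS AND PROOFS =====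

-- the nine interval lists the dict can ever hand out
def NINE : List (List Int) :=
  [ [0, 2, 4, 5, 7, 9, 11], [0, 2, 3, 5, 7, 8, 10], [0, 2, 3, 5, 7, 8, 11]
  , [0, 2, 3, 5, 7, 9, 11], [0, 2, 3, 5, 7, 9, 10], [0, 1, 3, 5, 7, 8, 10]
  , [0, 2, 4, 6, 7, 9, 11], [0, 2, 4, 5, 7, 9, 10], [0, 1, 3, 5, 6, 8, 10] ]

-- A's body after the dict lookup, as a function of the interval list
def coreA (pitch root_pc : Int) (iv : List Int) : Int :=
  if (PySem.Set.ofList (iv.map (fun i => PySem.Int.mod (root_pc + i) 12))).contains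
       (PySem.Int.mod pitch 12) then pitch
  else snapLoopA pitch (PySem.Set.ofList (iv.map (fun i => PySem.Int.mod (root_pc + i) 12)))
         (PySem.List.pyRange 1 7 1)

-- B's body after the dict lookup
def coreB (pitch root_pc : Int) (iv : List Int) : Int :=
  pitch +
    ((PySem.List.min?
        ((iv.map (fun i => PySem.Int.mod (root_pc + i - pitch) 12)).map
          (fun d => if d ≤ 6 then d else d - 12))
        (fun o => 2 * |o| + (if o < 0 then 1 else 0))).getD 0)

theorem snapA_eq (p r : Int) (m : String) :
    snap_to_scale p r m = coreA p r (SCALE_INTERVALS.getD m (SCALE_INTERVALS.getD "major" [])) := by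
  unfold snap_to_scale coreA
  rfl

theorem snapB_eq (p r : Int) (m : String) :
    snap_to_scale_alt p r m = coreB p r (SCALE_INTERVALS.getD m (SCALE_INTERVALS.getD "major" [])) := by
  unfold snap_to_scale_alt coreB
  rfl

theorem getD_mem_or {κ ν : Type} [BEq κ] (l : List (κ × ν)) (m : κ) (dflt : ν) :
    (PySem.Dict.mk l).getD m dflt = dflt ∨ (PySem.Dict.mk l).getD m dflt ∈ l.map Prod.snd := by
  unfold PySem.Dict.getD PySem.Dict.get?
  cases hf : List.find? (fun p => p.1 == m) l with
  | none => left; rfl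
  | some p =>
    right
    simp only [Option.map_some, Option.getD_some]
    exact List.mem_map_of_mem (List.mem_of_find?_eq_some hf)

set_option maxHeartbeats 1000000 in
theorem iv_mem (m : String) :
    SCALE_INTERVALS.getD m (SCALE_INTERVALS.getD "major" []) ∈ NINE := by
  have h : SCALE_INTERVALS = PySem.Dict.mk
    [ ("major",      [0, 2, 4, 5, 7, 9, 11])
    , ("minor",      [0, 2, 3, 5, 7, 8, 10])
    , ("harmonic",   [0, 2, 3, 5, 7, 8, 11])
    , ("melodic",    [0, 2, 3, 5, 7, 9, 11])
    , ("dorian",     [0, 2, 3, 5, 7, 9, 10])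
    , ("phrygian",   [0, 1, 3, 5, 7, 8, 10])
    , ("lydian",     [0, 2, 4, 6, 7, 9, 11])
    , ("mixolydian", [0, 2, 4, 5, 7, 9, 10])
    , ("locrian",    [0, 1, 3, 5, 6, 8, 10]) ] := by rfl
  have hm : SCALE_INTERVALS.getD "major" [] = [0, 2, 4, 5, 7, 9, 11] := by rfl
  rw [hm, h]
  rcases getD_mem_or
    (([ ("major",      [0, 2, 4, 5, 7, 9, 11])
    , ("minor",      [0, 2, 3, 5, 7, 8, 10])
    , ("harmonic",   [0, 2, 3, 5, 7, 8, 11])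
    , ("melodic",    [0, 2, 3, 5, 7, 9, 11])
    , ("dorian",     [0, 2, 3, 5, 7, 9, 10])
    , ("phrygian",   [0, 1, 3, 5, 7, 8, 10])
    , ("lydian",     [0, 2, 4, 6, 7, 9, 11])
    , ("mixolydian", [0, 2, 4, 5, 7, 9, 10])
    , ("locrian",    [0, 1, 3, 5, 6, 8, 10]) ]) : List (String × List Int)) m ([0, 2, 4, 5, 7, 9, 11] : List Int) with h2 | h2
  · rw [h2]; decide
  · exact (show List.map Prod.snd
      (([ ("major",      [0, 2, 4, 5, 7, 9, 11])
    , ("minor",      [0, 2, 3, 5, 7, 8, 10])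
    , ("harmonic",   [0, 2, 3, 5, 7, 8, 11])
    , ("melodic",    [0, 2, 3, 5, 7, 9, 11])
    , ("dorian",     [0, 2, 3, 5, 7, 9, 10])
    , ("phrygian",   [0, 1, 3, 5, 7, 8, 10])
    , ("lydian",     [0, 2, 4, 6, 7, 9, 11])
    , ("mixolydian", [0, 2, 4, 5, 7, 9, 10])
    , ("locrian",    [0, 1, 3, 5, 6, 8, 10]) ]) : List (String × List Int)) = NINE from rfl) ▸ h2

theorem mod12 (a : Int) : PySem.Int.mod a 12 = a % 12 :=
  PySem.Int.mod_eq_emod_of_pos (by norm_num)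

theorem memshift (p r x : Int) (iv : List Int) :
    (PySem.Set.ofList (iv.map (fun i => PySem.Int.mod (r + i) 12))).contains
      (PySem.Int.mod (p + x) 12)
    = (PySem.Set.ofList (iv.map (fun i => PySem.Int.mod ((r - p) % 12 + i) 12))).contains
      (PySem.Int.mod (0 + x) 12) := by
  simp only [PySem.Set.contains]
  rw [Bool.eq_iff_iff]
  simp only [List.contains_iff_mem, PySem.Set.mem_ofList, List.mem_map]
  constructor <;> rintro ⟨i, hi, h⟩ <;> refine ⟨i, hi, ?_⟩ <;>
    simp only [mod12] at * <;> omega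

theorem snapLoopA_shift (p r : Int) (iv : List Int) (ds : List Int) :
    snapLoopA p (PySem.Set.ofList (iv.map (fun i => PySem.Int.mod (r + i) 12))) ds
    = p + snapLoopA 0 (PySem.Set.ofList (iv.map (fun i => PySem.Int.mod ((r - p) % 12 + i) 12))) ds := by
  induction ds with
  | nil => simp [snapLoopA]
  | cons d rest ih =>
    simp only [snapLoopA]
    have h1 := memshift p r d iv
    have h2 := memshift p r (-d) iv
    simp only [← sub_eq_add_neg] at h2
    rw [h1, h2]
    split_ifs <;> [omega; omega; exact ih]

theorem coreA_shift (p r : Int) (iv : List Int) :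
    coreA p r iv = p + coreA 0 ((r - p) % 12) iv := by
  unfold coreA
  have h0 := memshift p r 0 iv
  simp only [add_zero] at h0
  rw [h0]
  split_ifs
  · omega
  · exact snapLoopA_shift p r iv _

theorem coreB_shift (p r : Int) (iv : List Int) :
    coreB p r iv = p + coreB 0 ((r - p) % 12) iv := by
  unfold coreB
  have h : iv.map (fun i => PySem.Int.mod (r + i - p) 12)
      = iv.map (fun i => PySem.Int.mod ((r - p) % 12 + i - 0) 12) := by
    apply List.map_congr_left
    intro i _
    simp only [mod12]
    omega
  rw [h]
  omega

theorem key_cases :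
    ∀ t ∈ PySem.List.pyRange 0 12 1, ∀ iv ∈ NINE, coreA 0 t iv = coreB 0 t iv := by decide

-- ===== VERDICT (by name: the statement is the Claim_ definition above) =====
theorem snap_to_scale_spec : Claim_equal_snap_to_scale := by
  intro p r m _
  unfold Spec_snap_to_scale
  rw [snapA_eq, snapB_eq, coreA_shift, coreB_shift]
  congr 1
  apply key_cases
  · simp only [PySem.List.mem_pyRange_one]
    constructor
    · exact Int.emod_nonneg _ (by norm_num)
    · exact Int.emod_lt_of_pos _ (by norm_num)
  · exact iv_mem m
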